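-- pv_equiv track=rewrite | github.com/Dirk-Hoffmann/Project-6 | dot25-algo.py | odds
-- ===== SOURCE A (Python) =====
-- def odds(hp_string):
--     index = 0
--     S_odd_indexes = []
--     S_even_indexes = []
--     for i in hp_string:
--         if i == "h" or i == "H":
--             if index%2 == 0:
--                 S_even_indexes.append(index)
--             else:
--                 S_odd_indexes.append(index)
--         elif i == "p" or i == "P":
--             None
--         else:
--             raise NameError("string does not consist  of only H and P")
--         index+=1
--
--     return S_odd_indexes
-- ===== SOURCE B (Python) =====
-- def odds(hp_string):
--     if set(hp_string) - set("hHpP"):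
--         raise NameError("string does not consist  of only H and P")
--     return [i for i in range(1, len(hp_string), 2) if hp_string[i] in "hH"]
-- ===== Notes on version B (the rewrite author's own statement) =====
-- stated objective: alternative
-- what changed: Replaces A's single per-character loop (manual index counter, two accumulator lists, mid-loop raise) with a set-difference validity check followed by direct index arithmetic: only the odd positions are visited via range(1, len, 2) and tested for h/H; the even accumulator disappears entirely.
import Mathlib
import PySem

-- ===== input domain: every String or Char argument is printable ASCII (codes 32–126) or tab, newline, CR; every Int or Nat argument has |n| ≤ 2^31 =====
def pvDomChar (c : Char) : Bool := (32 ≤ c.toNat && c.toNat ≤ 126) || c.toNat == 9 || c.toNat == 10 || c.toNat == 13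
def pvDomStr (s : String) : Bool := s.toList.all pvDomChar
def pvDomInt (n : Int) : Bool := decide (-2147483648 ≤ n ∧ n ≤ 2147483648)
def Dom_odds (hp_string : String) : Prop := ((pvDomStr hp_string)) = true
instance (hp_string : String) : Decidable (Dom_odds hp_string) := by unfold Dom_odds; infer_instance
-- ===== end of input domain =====

-- B validates with a set difference, then visits ONLY the odd positions by index
-- (range(1, len, 2)), instead of A's per-character scan with a counter and two accumulators.

-- ===== PORT A =====
-- the for-loop: index counter, two accumulators; the else branch raises NameError
-- (unreachable under Pre_odds), where the port returns the odd list accumulated so far.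
def oddsLoop (chars : List Char) (index : Int) (odd even : List Int) : List Int :=
  match chars with
  | [] => odd
  | c :: rest =>
    if c = 'h' ∨ c = 'H' then
      if index % 2 = 0 then oddsLoop rest (index + 1) odd (even ++ [index])
      else oddsLoop rest (index + 1) (odd ++ [index]) even
    else if c = 'p' ∨ c = 'P' then oddsLoop rest (index + 1) odd even
    else odd   -- raise NameError: excluded by Pre_odds

def odds (hp_string : String) : List Int :=
  oddsLoop hp_string.toList 0 [] []

-- ===== PORT B =====
-- set(hp_string) - set("hHpP") nonempty → raise (excluded by Pre_odds);
-- then [i for i in range(1, len(hp_string), 2) if hp_string[i] in "hH"]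
-- ('c in "hH"' for the single character hp_string[i] is c = 'h' ∨ c = 'H').
def odds_alt (hp_string : String) : List Int :=
  if PySem.Set.diff (PySem.Set.ofList hp_string.toList) "hHpP".toList ≠ [] then
    []   -- raise NameError: excluded by Pre_odds
  else
    (PySem.List.pyRange 1 hp_string.toList.length 2).filter
      (fun i => PySem.List.pyGet? hp_string.toList i = some 'h' ∨
                PySem.List.pyGet? hp_string.toList i = some 'H')

-- ===== PRECONDITION & SPEC =====
-- Pre_odds: both A and B raise NameError on any character other than h, H, p, P; exactly those inputs are excluded.
def Pre_odds (hp_string : String) : Prop :=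
  (hp_string.toList.all (fun c => c == 'h' || c == 'H' || c == 'p' || c == 'P')) = true
instance (hp_string : String) : Decidable (Pre_odds hp_string) := by unfold Pre_odds; infer_instance

def pvWitness_odds : String := "HpHhPp"

def Spec_odds (hp_string : String) (out : List Int) : Prop := out = odds_alt hp_string
instance (hp_string : String) (out : List Int) : Decidable (Spec_odds hp_string out) := by unfold Spec_odds; infer_instance

-- ===== CLAIM (what is proved, stated in full; the proofs are below) =====
def Claim_equal_odds : Prop := ∀ (hp_string : String), Dom_odds hp_string → Pre_odds hp_string → Spec_odds hp_string (odds hp_string)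

-- ===== LEMMAS AND PROOFS =====

-- the common value: odd h/H indices of chars, counting from i
def oddsFrom (chars : List Char) (i : Int) : List Int :=
  match chars with
  | [] => []
  | c :: rest =>
    if (c = 'h' ∨ c = 'H') ∧ i % 2 = 1 then i :: oddsFrom rest (i + 1)
    else oddsFrom rest (i + 1)

theorem oddsLoop_eq (chars : List Char) (i : Int) (odd even : List Int)
    (hv : ∀ c ∈ chars, c = 'h' ∨ c = 'H' ∨ c = 'p' ∨ c = 'P') :
    oddsLoop chars i odd even = odd ++ oddsFrom chars i := by
  induction chars generalizing i odd even with
  | nil => simp [oddsLoop, oddsFrom]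
  | cons c rest ih =>
    have hc := hv c (by simp)
    have hrest : ∀ c ∈ rest, c = 'h' ∨ c = 'H' ∨ c = 'p' ∨ c = 'P' :=
      fun x hx => hv x (by simp [hx])
    simp only [oddsLoop, oddsFrom]
    by_cases hH : c = 'h' ∨ c = 'H'
    · by_cases he : i % 2 = 0
      · have h1 : ¬ ((c = 'h' ∨ c = 'H') ∧ i % 2 = 1) := by
          rintro ⟨_, h⟩; omega
        simp [hH, he, ih _ _ _ hrest]
      · have h1 : (c = 'h' ∨ c = 'H') ∧ i % 2 = 1 := ⟨hH, by omega⟩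
        simp [hH, h1, ih _ _ _ hrest]
    · have hp : c = 'p' ∨ c = 'P' := by
        rcases hc with h | h | h | h <;> simp_all
      have h1 : ¬ ((c = 'h' ∨ c = 'H') ∧ i % 2 = 1) := fun ⟨h, _⟩ => hH h
      simp [hH, hp, ih _ _ _ hrest]

-- oddsFrom shifted by 2 is the same list with every entry shifted by 2
theorem oddsFrom_shift (chars : List Char) (i : Int) :
    oddsFrom chars (i + 2) = (oddsFrom chars i).map (· + 2) := by
  induction chars generalizing i with
  | nil => simp [oddsFrom]
  | cons c rest ih =>
    have hmod : (i + 2) % 2 = i % 2 := by omega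
    simp only [oddsFrom, hmod]
    by_cases h : (c = 'h' ∨ c = 'H') ∧ i % 2 = 1
    · have : i + 2 + 1 = (i + 1) + 2 := by ring
      simp [h, this, ih]
    · have : i + 2 + 1 = (i + 1) + 2 := by ring
      simp [h, this, ih]

-- range(1, n+2, 2) = 1 :: (range(1, n, 2) shifted by 2), for n ≥ 0
theorem pyRange_two_step (n : Nat) :
    PySem.List.pyRange 1 ((n : Int) + 2) 2 =
      1 :: (PySem.List.pyRange 1 (n : Int) 2).map (· + 2) := by
  rw [PySem.List.pyRange_of_pos _ _ (by norm_num),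
      PySem.List.pyRange_of_pos _ _ (by norm_num)]
  have h1 : (1 : Int) < (n : Int) + 2 := by omega
  have h2 : (((n : Int) + 2 - 1 + 2 - 1) / 2).toNat =
      (if (1 : Int) < (n : Int) then (((n : Int) - 1 + 2 - 1) / 2).toNat else 0) + 1 := by
    split_ifs with h
    · omega
    · omega
  rw [if_pos h1, h2, List.range_succ_eq_map]
  simp only [List.map_cons, List.map_map]
  refine List.cons_eq_cons.mpr ⟨by norm_num, ?_⟩
  apply List.map_congr_left
  intro k _
  simp [Function.comp]
  ring

-- range(1, n, 2) is empty for n ≤ 1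
theorem pyRange_two_nil (m : Int) (h : m ≤ 1) :
    PySem.List.pyRange 1 m 2 = [] := by
  rw [PySem.List.pyRange_of_pos _ _ (by norm_num)]
  rw [if_neg (by omega)]
  simp

-- B's comprehension equals the common value
theorem filter_range_eq (cs : List Char) :
    (PySem.List.pyRange 1 cs.length 2).filter
      (fun i => PySem.List.pyGet? cs i = some 'h' ∨ PySem.List.pyGet? cs i = some 'H')
    = oddsFrom cs 0 := by
  match cs with
  | [] => simp [pyRange_two_nil 0 (by norm_num), oddsFrom]
  | [a] => simp [pyRange_two_nil 1 (by norm_num), oddsFrom]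
  | a :: b :: rest =>
    have ih := filter_range_eq rest
    have hlen : ((a :: b :: rest).length : Int) = (rest.length : Int) + 2 := by
      simp; omega
    rw [hlen, pyRange_two_step rest.length, List.filter_cons, List.filter_map]
    have hb : PySem.List.pyGet? (a :: b :: rest) 1 = some b := by
      have : (1 : Int) = ((1 : Nat) : Int) := by norm_num
      rw [this, PySem.List.pyGet?_natCast]
      rfl
    have hshift : ∀ j ∈ PySem.List.pyRange 1 (rest.length : Int) 2,
        PySem.List.pyGet? (a :: b :: rest) (j + 2) = PySem.List.pyGet? rest j := by
      intro j hj
      have hj1 : 1 ≤ j := (PySem.List.mem_pyRange_iff_of_pos (by norm_num) j).mp hj |>.1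
      rw [PySem.List.pyGet?_of_nonneg _ (show (0:Int) ≤ j + 2 by omega),
          PySem.List.pyGet?_of_nonneg _ (show (0:Int) ≤ j by omega)]
      have h2 : (j + 2).toNat = j.toNat + 2 := by omega
      rw [h2]
      simp
    have hfeq : (PySem.List.pyRange 1 (rest.length : Int) 2).filter
        ((fun i => decide (PySem.List.pyGet? (a :: b :: rest) i = some 'h' ∨
                            PySem.List.pyGet? (a :: b :: rest) i = some 'H')) ∘ (· + 2))
        = (PySem.List.pyRange 1 (rest.length : Int) 2).filter
          (fun i => decide (PySem.List.pyGet? rest i = some 'h' ∨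
                            PySem.List.pyGet? rest i = some 'H')) := by
      apply List.filter_congr
      intro j hj
      simp [Function.comp, hshift j hj]
    rw [hfeq, ih]
    have hR : oddsFrom (a :: b :: rest) 0 =
        if b = 'h' ∨ b = 'H' then 1 :: (oddsFrom rest 0).map (· + 2)
        else (oddsFrom rest 0).map (· + 2) := by
      simp only [oddsFrom]
      norm_num
      rw [show (2:Int) = 0 + 2 by norm_num, oddsFrom_shift]
      norm_num
    rw [hR]
    by_cases hB : b = 'h' ∨ b = 'H'
    · rcases hB with h | h <;> subst h <;> simp
    · have hb' : b ≠ 'h' ∧ b ≠ 'H' := by tauto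
      simp [hb'.1, hb'.2]
termination_by cs.length

-- ===== VERDICT (by name: the statement is the Claim_ definition above) =====
theorem odds_spec : Claim_equal_odds := by
  intro s _ hpre0
  have hpre : ∀ c ∈ s.toList, c = 'h' ∨ c = 'H' ∨ c = 'p' ∨ c = 'P' := by
    intro c hc
    have h := List.all_eq_true.mp hpre0 c hc
    simp only [Bool.or_eq_true, beq_iff_eq] at h
    tauto
  unfold Spec_odds odds odds_alt
  have hdiff : PySem.Set.diff (PySem.Set.ofList s.toList) "hHpP".toList = [] := by
    apply List.eq_nil_iff_forall_not_mem.mpr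
    intro x hx
    have hm := (PySem.Set.mem_diff _ _ _).mp hx
    have hx' : x ∈ s.toList := (PySem.Set.mem_ofList _ _).mp hm.1
    rcases hpre x hx' with h | h | h | h <;> subst h <;> exact hm.2 (by decide)
  rw [if_neg (not_ne_iff.mpr hdiff), oddsLoop_eq _ _ _ _ hpre, filter_range_eq]
  simp
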